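-- pv_equiv track=rewrite | github.com/arnabs542/BigO-Coding-material | Lecture2/sansa_xor.py | generate_sub_array
-- ===== SOURCE A (Python) =====
-- def generate_sub_array(arr):
-- 	n = len(arr)
-- 	result = []
-- 	# O(n^2)
-- 	for num in range(1, n+1):
-- 		for i in range(n - num + 1):
-- 			result.append(arr[i:i+num])
--
-- 	output_cnt = {}
-- 	for res in result:
-- 		for num in res:
-- 			try:
-- 				output_cnt[num] += 1
-- 			except:
-- 				output_cnt[num] = 1
--
-- 	return output_cnt
-- ===== SOURCE B (Python) =====
-- def generate_sub_array(arr):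
--     n = len(arr)
--     output_cnt = {}
--     for i, x in enumerate(arr):
--         output_cnt[x] = output_cnt.get(x, 0) + (i + 1) * (n - i)
--     return output_cnt
-- ===== Notes on version B (the rewrite author's own statement) =====
-- stated objective: faster
-- what changed: Instead of materialising all O(n^2) subarrays and counting every element of every subarray, B does one pass over the array adding the closed-form weight (i+1)*(n-i) (the number of subarrays containing index i) to the count of arr[i].
import Mathlib
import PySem

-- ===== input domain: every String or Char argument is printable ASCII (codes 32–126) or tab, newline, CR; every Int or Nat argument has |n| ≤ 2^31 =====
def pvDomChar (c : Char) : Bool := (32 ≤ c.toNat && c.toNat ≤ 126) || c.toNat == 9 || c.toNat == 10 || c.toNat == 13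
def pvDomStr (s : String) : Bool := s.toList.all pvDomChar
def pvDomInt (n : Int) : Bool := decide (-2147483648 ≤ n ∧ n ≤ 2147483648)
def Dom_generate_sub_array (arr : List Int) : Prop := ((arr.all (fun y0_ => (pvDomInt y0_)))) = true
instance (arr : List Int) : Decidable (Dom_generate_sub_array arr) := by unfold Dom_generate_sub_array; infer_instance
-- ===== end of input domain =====

-- B replaces A's materialisation of all contiguous subarrays (and counting every element of
-- every subarray) by a single pass adding the closed-form weight (i+1)*(n-i) — the number of
-- subarrays containing index i — to the count of arr[i]; objective: faster.

-- ===== PORT A =====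
def generate_sub_array (arr : List Int) : List (Int × Int) :=
  let n : Int := PySem.List.len arr
  let result : List (List Int) :=
    (PySem.List.pyRange 1 (n + 1)).foldl (fun result num =>
      (PySem.List.pyRange 0 (n - num + 1)).foldl (fun result i =>
        result ++ [PySem.List.slice arr (some i) (some (i + num))]) result) []
  let output_cnt : PySem.Dict Int Int :=
    result.foldl (fun d res =>
      res.foldl (fun d num => d.modify num 0 (· + 1)) d) PySem.Dict.empty
  output_cnt.items

-- ===== PORT B =====
def generate_sub_array_alt (arr : List Int) : List (Int × Int) :=
  let n : Int := PySem.List.len arr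
  ((PySem.List.enumerate arr).foldl (fun d p =>
      d.insert p.2 (d.getD p.2 0 + (p.1 + 1) * (n - p.1))) PySem.Dict.empty).items

-- ===== PRECONDITION & SPEC =====
def Spec_generate_sub_array (arr : List Int) (out : List (Int × Int)) : Prop := out = generate_sub_array_alt arr
instance (arr : List Int) (out : List (Int × Int)) : Decidable (Spec_generate_sub_array arr out) := by unfold Spec_generate_sub_array; infer_instance

-- ===== CLAIM (what is proved, stated in full; the proofs are below) =====
def Claim_equal_generate_sub_array : Prop := ∀ (arr : List Int), Dom_generate_sub_array arr → Spec_generate_sub_array arr (generate_sub_array arr)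

-- ===== LEMMAS AND PROOFS =====

-- getD after a fold of weighted inserts accumulates the weights of the matching pairs
theorem getD_insert_fold (l : List (Int × Int)) (w : Int × Int → Int)
    (d : PySem.Dict Int Int) (k : Int) :
    (l.foldl (fun d p => d.insert p.2 (d.getD p.2 0 + w p)) d).getD k 0
      = d.getD k 0 + ((l.filter (fun p => p.2 == k)).map w).sum := by
  induction l generalizing d with
  | nil => simp
  | cons p t ih =>
    simp only [List.foldl_cons, List.filter_cons, ih]
    by_cases h : p.2 = k
    · simp [h]
      ring
    · simp [PySem.Dict.getD_insert, h, Ne.symm h]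

-- updating a set with elements it already has does not change it
theorem set_update_of_subset (s l : List Int) (h : ∀ x ∈ l, x ∈ s) :
    PySem.Set.update s l = s := by
  induction l generalizing s with
  | nil => rfl
  | cons a t ih =>
    have ha : PySem.Set.add s a = s := by
      simp [PySem.Set.add, PySem.Set.contains, h a (by simp)]
    simp only [PySem.Set.update, List.foldl_cons, ha]
    exact ih s (fun x hx => h x (by simp [hx]))

-- count as a sum of indicators over positions
theorem count_eq_sum_range (ys : List Int) (k : Int) :
    ys.count k = ∑ j ∈ Finset.range ys.length, (if ys.getD j 0 = k then 1 else 0) := by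
  induction ys with
  | nil => simp
  | cons a t ih =>
    rw [List.count_cons, List.length_cons, Finset.sum_range_succ']
    simp [ih, add_comm]

theorem getD_take_drop (xs : List Int) (i m j : ℕ) (hj : j < m) (h : i + m ≤ xs.length) :
    ((xs.drop i).take m).getD j 0 = xs.getD (i + j) 0 := by
  have h1 : j < ((xs.drop i).take m).length := by simp; omega
  have h2 : i + j < xs.length := by omega
  rw [List.getD_eq_getElem _ _ h1, List.getD_eq_getElem _ _ h2]
  simp [List.getElem_take, List.getElem_drop]

theorem count_take_drop (xs : List Int) (k : Int) (i m : ℕ) (h : i + m ≤ xs.length) :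
    ((xs.drop i).take m).count k
      = ∑ j ∈ Finset.Ico i (i + m), (if xs.getD j 0 = k then 1 else 0) := by
  rw [count_eq_sum_range, Finset.sum_Ico_eq_sum_range]
  have hlen : ((xs.drop i).take m).length = m := by simp; omega
  rw [hlen, add_tsub_cancel_left]
  exact Finset.sum_congr rfl (fun j hj =>
    by rw [getD_take_drop xs i m j (Finset.mem_range.mp hj) h])

-- the number of (length, start) pairs whose subarray covers position u is (u+1)*(n-u)
theorem fiber_card (n u : ℕ) :
    (∑ t ∈ Finset.range n, ∑ i ∈ Finset.range n,
      if i + t < n ∧ i ≤ u ∧ u < i + t + 1 then 1 else 0) = (u + 1) * (n - u) := by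
  have h1 : (∑ t ∈ Finset.range n, ∑ i ∈ Finset.range n,
      if i + t < n ∧ i ≤ u ∧ u < i + t + 1 then 1 else 0)
      = ∑ p ∈ Finset.range n ×ˢ Finset.range n,
          if p.2 + p.1 < n ∧ p.2 ≤ u ∧ u < p.2 + p.1 + 1 then 1 else 0 := by
    rw [Finset.sum_product]
  rw [h1, Finset.sum_boole]
  have h2 : ((Finset.range n ×ˢ Finset.range n).filter
      (fun p => p.2 + p.1 < n ∧ p.2 ≤ u ∧ u < p.2 + p.1 + 1)).card
      = (Finset.range (u+1) ×ˢ Finset.Ico u n).card := by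
    apply Finset.card_nbij' (fun p => (p.2, p.2 + p.1)) (fun q => (q.2 - q.1, q.1))
    · intro p hp
      simp only [Finset.coe_filter, Set.mem_setOf_eq, Finset.mem_product, Finset.mem_range] at hp
      simp only [Finset.coe_product, Set.mem_prod, Finset.mem_coe, Finset.mem_range, Finset.mem_Ico]
      omega
    · intro q hq
      simp only [Finset.coe_product, Set.mem_prod, Finset.mem_coe, Finset.mem_range, Finset.mem_Ico] at hq
      simp only [Finset.coe_filter, Set.mem_setOf_eq, Finset.mem_product, Finset.mem_range]
      omega
    · intro p hp
      simp only [Finset.coe_filter, Set.mem_setOf_eq, Finset.mem_product, Finset.mem_range] at hp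
      ext <;> simp
    · intro q hq
      simp only [Finset.coe_product, Set.mem_prod, Finset.mem_coe, Finset.mem_range, Finset.mem_Ico] at hq
      ext <;> simp
      omega
  rw [h2, Finset.card_product, Nat.card_Ico, Finset.card_range]
  simp

-- the combinatorial core: total count of k over all contiguous subarrays
theorem core_sum (xs : List Int) (k : Int) :
    (∑ t ∈ Finset.range xs.length, ∑ i ∈ Finset.range (xs.length - t),
        ((xs.drop i).take (t+1)).count k)
      = ∑ u ∈ Finset.range xs.length,
          (if xs.getD u 0 = k then (u + 1) * (xs.length - u) else 0) := by
  set n := xs.length with hn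
  have step1 : ∀ t ∈ Finset.range n,
      (∑ i ∈ Finset.range (n - t), ((xs.drop i).take (t+1)).count k)
      = ∑ i ∈ Finset.range n, ∑ u ∈ Finset.range n,
          (if i + t < n ∧ i ≤ u ∧ u < i + t + 1 then (if xs.getD u 0 = k then 1 else 0) else 0) := by
    intro t ht
    rw [Finset.mem_range] at ht
    rw [← Finset.sum_subset (by intro x hx; rw [Finset.mem_range] at *; omega :
          Finset.range (n - t) ⊆ Finset.range n)
        (fun i hi hni => by
          rw [Finset.mem_range] at hi
          rw [Finset.mem_range] at hni
          apply Finset.sum_eq_zero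
          intro u _
          rw [if_neg]
          omega)]
    apply Finset.sum_congr rfl
    intro i hi
    rw [Finset.mem_range] at hi
    have hb : i + (t+1) ≤ n := by omega
    rw [count_take_drop xs k i (t+1) hb]
    have hcong : ∀ u ∈ Finset.range n,
        (if i + t < n ∧ i ≤ u ∧ u < i + t + 1 then (if xs.getD u 0 = k then 1 else 0) else 0)
        = (if u ∈ Finset.Ico i (i + (t+1)) then (if xs.getD u 0 = k then 1 else 0) else 0) := by
      intro u hu
      rw [Finset.mem_range] at hu
      by_cases hc : i ≤ u ∧ u < i + t + 1
      · rw [if_pos (by omega : i + t < n ∧ i ≤ u ∧ u < i + t + 1),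
            if_pos (Finset.mem_Ico.mpr (by omega))]
      · rw [if_neg (by omega), if_neg (by rw [Finset.mem_Ico]; omega)]
    rw [Finset.sum_congr rfl hcong, Finset.sum_ite_mem,
        Finset.inter_eq_right.mpr (by intro u hu; rw [Finset.mem_Ico] at hu; rw [Finset.mem_range]; omega)]
  rw [Finset.sum_congr rfl step1]
  rw [Finset.sum_comm]
  have swap2 : ∀ i ∈ Finset.range n,
      (∑ t ∈ Finset.range n, ∑ u ∈ Finset.range n,
        (if i + t < n ∧ i ≤ u ∧ u < i + t + 1 then (if xs.getD u 0 = k then 1 else 0) else 0))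
      = ∑ u ∈ Finset.range n, ∑ t ∈ Finset.range n,
        (if i + t < n ∧ i ≤ u ∧ u < i + t + 1 then (if xs.getD u 0 = k then 1 else 0) else 0) :=
    fun i _ => Finset.sum_comm
  rw [Finset.sum_congr rfl swap2, Finset.sum_comm]
  apply Finset.sum_congr rfl
  intro u hu
  rw [Finset.mem_range] at hu
  by_cases h : xs.getD u 0 = k
  · simp only [h, if_true]
    rw [Finset.sum_comm]
    exact fiber_card n u
  · simp only [if_neg h, ite_self, Finset.sum_const_zero]

-- the flattened length-1 block is arr itself
theorem flatten_take_one (arr : List Int) :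
    ((List.range arr.length).map (fun i => (arr.drop i).take 1)).flatten = arr := by
  induction arr with
  | nil => simp
  | cons a t ih =>
    rw [List.length_cons, List.range_succ_eq_map]
    simp only [List.map_cons, List.map_map, List.flatten_cons]
    have : (List.map ((fun i => ((a :: t).drop i).take 1) ∘ Nat.succ) (List.range t.length))
         = List.map (fun i => (t.drop i).take 1) (List.range t.length) := by
      apply List.map_congr_left
      intro i _
      simp
    rw [this, ih]
    simp

-- list sum over a mapped range is a Finset sum
theorem list_sum_range (n : ℕ) (f : ℕ → ℤ) :
    ((List.range n).map f).sum = ∑ i ∈ Finset.range n, f i := rfl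

theorem list_sum_range_nat (n : ℕ) (f : ℕ → ℕ) :
    ((List.range n).map f).sum = ∑ i ∈ Finset.range n, f i := rfl

-- sum over a filtered list as a sum of guarded terms
theorem sum_map_filter {α : Type} (l : List α) (q : α → Bool) (w : α → Int) :
    ((l.filter q).map w).sum = (l.map (fun x => if q x then w x else 0)).sum := by
  induction l with
  | nil => rfl
  | cons a t ih =>
    by_cases h : q a
    · simp [h, ih]
    · simp [h, ih]


theorem bval_eq (arr : List Int) (k : Int) :
    ((PySem.List.enumerate arr).foldl
        (fun d x => d.insert x.2 (d.getD x.2 0 + (x.1 + 1) * ((arr.length : Int) - x.1)))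
        PySem.Dict.empty).getD k 0
      = ∑ u ∈ Finset.range arr.length,
          (if arr.getD u 0 = k then ((u:Int) + 1) * ((arr.length:Int) - u) else 0) := by
  rw [getD_insert_fold (PySem.List.enumerate arr) (fun p => (p.1 + 1) * ((arr.length : Int) - p.1))
      PySem.Dict.empty k]
  rw [PySem.Dict.getD_empty, zero_add]
  rw [PySem.List.enumerate_eq_map_pyRange arr 0, List.filter_map, List.map_map]
  rw [sum_map_filter]
  rw [PySem.List.pyRange_one 0 (PySem.List.len arr)]
  simp only [PySem.List.len_eq, sub_zero, Int.toNat_natCast, List.map_map]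
  rw [list_sum_range]
  apply Finset.sum_congr rfl
  intro j hj
  rw [Finset.mem_range] at hj
  simp [PySem.List.pyGetD_natCast]

theorem countL_eq (arr : List Int) (k : Int) :
    (List.count k
        (List.flatMap
            (fun x =>
              List.map (fun i => PySem.List.slice arr (some i) (some (i + x)))
                (PySem.List.pyRange 0 ((arr.length : Int) - x + 1)))
            (PySem.List.pyRange 1 ((arr.length : Int) + 1))).flatten)
      = ∑ u ∈ Finset.range arr.length,
          (if arr.getD u 0 = k then (u + 1) * (arr.length - u) else 0) := by
  rw [List.count_flatten, List.map_flatMap, List.flatMap_def, List.sum_flatten, List.map_map]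
  rw [PySem.List.pyRange_one 1 ((arr.length : Int) + 1)]
  simp only [add_sub_cancel_right, Int.toNat_natCast, List.map_map]
  rw [list_sum_range_nat]
  rw [← core_sum arr k]
  apply Finset.sum_congr rfl
  intro t ht
  rw [Finset.mem_range] at ht
  simp only [Function.comp_apply]
  have hr : (arr.length : Int) - (1 + (t:Int)) + 1 = ((arr.length - t : ℕ) : Int) := by
    push_cast [Nat.cast_sub (le_of_lt ht)]; ring
  rw [hr, PySem.List.pyRange_one 0 _]
  simp only [sub_zero, Int.toNat_natCast, List.map_map]
  rw [list_sum_range_nat]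
  apply Finset.sum_congr rfl
  intro i hi
  rw [Finset.mem_range] at hi
  simp only [Function.comp_apply, zero_add]
  have hcast : (i:Int) + (1 + (t:Int)) = (i:Int) + ((t+1 : ℕ) : Int) := by push_cast; ring
  rw [hcast, PySem.List.slice_natCast_add]

theorem ofList_append (xs ys : List Int) :
    PySem.Set.ofList (xs ++ ys) = PySem.Set.update (PySem.Set.ofList xs) ys := by
  simp [PySem.Set.ofList_eq_foldl, PySem.Set.update, List.foldl_append]

theorem keys_eq (arr : List Int) :
    PySem.Set.ofList
      (List.flatMap
          (fun x =>
            List.map (fun i => PySem.List.slice arr (some i) (some (i + x)))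
              (PySem.List.pyRange 0 ((arr.length : Int) - x + 1)))
          (PySem.List.pyRange 1 ((arr.length : Int) + 1))).flatten
      = PySem.Set.ofList arr := by
  rcases List.eq_nil_or_concat' arr with rfl | _
  · rfl
  · have hlen : 0 < arr.length := by
      rcases arr with _ | _
      · simp_all
      · simp
    rw [PySem.List.pyRange_one_cons (by exact_mod_cast by omega : (1:Int) < (arr.length : Int) + 1)]
    rw [List.flatMap_cons, List.flatten_append]
    have hblock : (List.map (fun i => PySem.List.slice arr (some i) (some (i + 1)))
        (PySem.List.pyRange 0 ((arr.length : Int) - 1 + 1))).flatten = arr := by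
      have h1 : (arr.length : Int) - 1 + 1 = (arr.length : Int) := by ring
      rw [h1, PySem.List.pyRange_one 0 _]
      simp only [sub_zero, Int.toNat_natCast, List.map_map]
      have h2 : ∀ i, ((fun i => PySem.List.slice arr (some i) (some (i + 1))) ∘ (fun k : ℕ => (0:Int) + (k:Int))) i
          = (arr.drop i).take 1 := by
        intro i
        simp only [Function.comp_apply, zero_add]
        have : (i:Int) + 1 = (i:Int) + ((1:ℕ):Int) := by push_cast; ring
        rw [this, PySem.List.slice_natCast_add]
      rw [List.map_congr_left (fun i _ => h2 i)]
      exact flatten_take_one arr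
    rw [hblock, ofList_append]
    apply set_update_of_subset
    intro x hx
    rw [PySem.Set.mem_ofList]
    simp only [List.mem_flatten, List.mem_flatMap, List.mem_map] at hx
    obtain ⟨l, ⟨num, _, ⟨i, _, rfl⟩⟩, hxl⟩ := hx
    exact PySem.List.mem_of_mem_slice arr _ _ hxl

-- ===== VERDICT (by name: the statement is the Claim_ definition above) =====
theorem generate_sub_array_spec : Claim_equal_generate_sub_array := by
  intro arr _
  show generate_sub_array arr = generate_sub_array_alt arr
  unfold generate_sub_array generate_sub_array_alt
  simp only [PySem.List.len_eq, PySem.List.foldl_append_singleton_eq_map,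
             PySem.List.foldl_append_eq_flatMap, List.nil_append]
  rw [← List.foldl_flatten, ← PySem.Dict.counter_eq_foldl, PySem.Dict.items_counter]
  rw [PySem.Dict.items_eq_map_keys _
        (PySem.Dict.nodup_keys_foldl_insert_key _ _ _ _ PySem.Dict.nodup_keys_empty) 0]
  rw [PySem.Dict.keys_foldl_insert_key (PySem.List.enumerate arr) (fun p => p.2)
        (fun d p => d.getD p.2 0 + (p.1 + 1) * ((arr.length : Int) - p.1)) PySem.Dict.empty]
  rw [PySem.Dict.keys_empty, PySem.List.map_snd_enumerate]
  rw [show PySem.Set.update ([] : PySem.Set Int) arr = PySem.Set.ofList arr from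
        (PySem.Set.ofList_eq_foldl arr).symm]
  rw [keys_eq arr]
  apply List.map_congr_left
  intro k hk
  rw [bval_eq arr k, countL_eq arr k]
  have hc : ((∑ u ∈ Finset.range arr.length,
        (if arr.getD u 0 = k then (u + 1) * (arr.length - u) else 0) : ℕ) : Int)
      = ∑ u ∈ Finset.range arr.length,
          (if arr.getD u 0 = k then ((u:Int) + 1) * ((arr.length:Int) - u) else 0) := by
    rw [Nat.cast_sum]
    apply Finset.sum_congr rfl
    intro u hu
    rw [Finset.mem_range] at hu
    by_cases h : arr.getD u 0 = k
    · rw [if_pos h, if_pos h]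
      push_cast [Nat.cast_sub (le_of_lt hu)]
      ring
    · rw [if_neg h, if_neg h, Nat.cast_zero]
  rw [hc]
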